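-- pv_equiv track=rewrite | github.com/pgirolami/ifrs-expert | src/commands/answer.py | _extract_prompt_content
-- ===== SOURCE A (Python) =====
-- def _extract_prompt_content(full_output: str) -> str:
--     """Extract only the prompt content, skipping the chunk summary at the top."""
--     lines = full_output.split("\n")
--
--     start_idx = 0
--     for i, line in enumerate(lines):
--         if line.startswith("You are an IFRS expert"):
--             start_idx = i
--             break
--
--     return "\n".join(lines[start_idx:])
-- ===== SOURCE B (Python) =====
-- def _extract_prompt_content(full_output: str) -> str:
--     """Extract only the prompt content, skipping the chunk summary at the top."""
--     marker = "You are an IFRS expert"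
--     if full_output.startswith(marker):
--         return full_output
--     idx = full_output.find("\n" + marker)
--     if idx == -1:
--         return full_output
--     return full_output[idx + 1:]
-- ===== Notes on version B (the rewrite author's own statement) =====
-- stated objective: idiomatic
-- what changed: B drops the split-into-lines / indexed loop / join rebuild: it checks startswith(marker), otherwise finds the first occurrence of newline+marker in the raw string and returns one slice of it (the whole string if absent), building no line list.
import Mathlib
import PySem

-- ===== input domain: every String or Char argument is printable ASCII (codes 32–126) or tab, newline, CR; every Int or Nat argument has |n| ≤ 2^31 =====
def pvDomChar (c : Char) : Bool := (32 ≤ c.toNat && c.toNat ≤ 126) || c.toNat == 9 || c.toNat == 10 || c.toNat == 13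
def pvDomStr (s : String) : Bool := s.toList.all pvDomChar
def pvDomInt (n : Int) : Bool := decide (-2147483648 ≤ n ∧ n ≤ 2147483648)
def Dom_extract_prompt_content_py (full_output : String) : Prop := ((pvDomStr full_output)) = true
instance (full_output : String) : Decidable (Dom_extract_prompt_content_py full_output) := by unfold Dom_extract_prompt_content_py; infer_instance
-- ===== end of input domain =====

-- B replaces split/loop/join with startswith + one find of "\n"+marker and a single slice (idiomatic, no line list built).

-- ===== PORT A =====
def pvMarkerL : List Char := "You are an IFRS expert".toList

-- the 'for i, line in enumerate(lines): if line.startswith(...): start_idx = i; break' loop (default 0)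
def pvFirstIdxLoop : List (Int × List Char) → Int
  | [] => 0
  | (i, line) :: rest =>
      if PySem.Chars.startswith line pvMarkerL then i else pvFirstIdxLoop rest

def extract_prompt_content_py (full_output : String) : String :=
  let lines := PySem.Chars.splitOn full_output.toList ['\n']
  let start_idx := pvFirstIdxLoop (PySem.List.enumerate lines)
  String.ofList (PySem.Chars.join ['\n'] (PySem.List.slice lines (some start_idx) none))

-- ===== PORT B =====
-- "\nYou are an IFRS expert" is Python's "\n" + marker, written as the concatenated literal
def extract_prompt_content_py_alt (full_output : String) : String :=
  if PySem.Str.startswith full_output "You are an IFRS expert" then full_output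
  else
    let idx := PySem.Str.find full_output "\nYou are an IFRS expert"
    if idx = -1 then full_output
    else PySem.Str.slice full_output (some (idx + 1)) none

-- ===== PRECONDITION & SPEC =====
def Spec_extract_prompt_content_py (full_output : String) (out : String) : Prop := out = extract_prompt_content_py_alt full_output
instance (full_output : String) (out : String) : Decidable (Spec_extract_prompt_content_py full_output out) := by unfold Spec_extract_prompt_content_py; infer_instance

-- ===== CLAIM (what is proved, stated in full; the proofs are below) =====
def Claim_equal_extract_prompt_content_py : Prop := ∀ (full_output : String), Dom_extract_prompt_content_py full_output → Spec_extract_prompt_content_py full_output (extract_prompt_content_py full_output)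

-- ===== LEMMAS AND PROOFS =====

def pvPat : List Char := '\n' :: pvMarkerL

-- reference splitter: split on '\n'
def pvSplit : List Char → List (List Char)
  | [] => [[]]
  | c :: r =>
      if c = '\n' then [] :: pvSplit r
      else
        match pvSplit r with
        | [] => [[c]]
        | h :: t => (c :: h) :: t

def pvConsHead (p : List Char) : List (List Char) → List (List Char)
  | [] => [p]
  | h :: t => (p ++ h) :: t

theorem pvSplit_ne_nil (cs : List Char) : pvSplit cs ≠ [] := by
  cases cs with
  | nil => simp [pvSplit]
  | cons c r =>
    by_cases hc : c = '\n'
    · simp [pvSplit, hc]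
    · cases h : pvSplit r with
      | nil => simp [pvSplit, hc, h]
      | cons a t => simp [pvSplit, hc, h]

theorem pv_go_spec : ∀ (fuel : Nat) (l cur acc : _), l.length ≤ fuel →
    PySem.Chars.splitOn.go ['\n'] fuel l cur acc
      = acc.reverse ++ pvConsHead cur.reverse (pvSplit l) := by
  intro fuel
  induction fuel with
  | zero =>
    intro l cur acc hl
    have : l = [] := by
      cases l with
      | nil => rfl
      | cons a b => simp at hl
    subst this
    simp [PySem.Chars.splitOn.go, pvSplit, pvConsHead]
  | succ n ih =>
    intro l cur acc hl
    cases l with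
    | nil => simp [PySem.Chars.splitOn.go, pvSplit, pvConsHead]
    | cons c rest =>
      by_cases hc : c = '\n'
      · subst hc
        have hpre : (['\n'] : List Char).isPrefixOf ('\n' :: rest) = true := by
          simp [List.isPrefixOf]
        rw [show PySem.Chars.splitOn.go ['\n'] (n+1) ('\n' :: rest) cur acc
              = PySem.Chars.splitOn.go ['\n'] n (List.drop 1 ('\n' :: rest)) [] (cur.reverse :: acc) from by
            simp [PySem.Chars.splitOn.go, hpre]]
        rw [ih _ _ _ (by simpa using Nat.le_of_succ_le_succ hl)]
        simp only [pvSplit, List.reverse_nil, pvConsHead]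
        cases hh : pvSplit rest with
        | nil => exact absurd hh (pvSplit_ne_nil rest)
        | cons a t => simp [hh]
      · have hpre : (['\n'] : List Char).isPrefixOf (c :: rest) = false := by
          simp [List.isPrefixOf]
          exact fun h => absurd h.symm hc
        rw [show PySem.Chars.splitOn.go ['\n'] (n+1) (c :: rest) cur acc
              = PySem.Chars.splitOn.go ['\n'] n rest (c :: cur) acc from by
            simp [PySem.Chars.splitOn.go, hpre]]
        rw [ih _ _ _ (by simpa using Nat.le_of_succ_le_succ hl)]
        cases h : pvSplit rest with
        | nil => exact absurd h (pvSplit_ne_nil rest)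
        | cons a t => simp [pvSplit, hc, h, pvConsHead]

theorem pv_splitOn_eq (cs : List Char) : PySem.Chars.splitOn cs ['\n'] = pvSplit cs := by
  have h := pv_go_spec (cs.length + 1) cs [] [] (by omega)
  cases hh : pvSplit cs with
  | nil => exact absurd hh (pvSplit_ne_nil cs)
  | cons a t =>
    rw [hh] at h
    simpa [PySem.Chars.splitOn, pvConsHead, hh] using h

theorem pvSplit_free : ∀ (cs : List Char), ∀ l ∈ pvSplit cs, '\n' ∉ l := by
  intro cs
  induction cs with
  | nil => intro l hl; simp [pvSplit] at hl; simp [hl]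
  | cons c r ih =>
    intro l hl
    by_cases hc : c = '\n'
    · simp [pvSplit, hc] at hl
      rcases hl with h | h
      · simp [h]
      · exact ih l h
    · cases hh : pvSplit r with
      | nil => exact absurd hh (pvSplit_ne_nil r)
      | cons a t =>
        simp [pvSplit, hc, hh] at hl
        rcases hl with h | h
        · subst h
          intro hmem
          rcases List.mem_cons.mp hmem with h1 | h1
          · exact hc h1.symm
          · exact ih a (by simp [hh]) h1
        · exact ih l (by simp [hh, h])

theorem pv_ic_singleton (x : List Char) : List.intercalate ['\n'] [x] = x := by
  simp [List.intercalate]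

theorem pv_ic_cons (x y : List Char) (t : List (List Char)) :
    List.intercalate ['\n'] (x :: y :: t) = x ++ '\n' :: List.intercalate ['\n'] (y :: t) := by
  simp [List.intercalate]

theorem pv_ic_pvSplit : ∀ (cs : List Char), List.intercalate ['\n'] (pvSplit cs) = cs := by
  intro cs
  induction cs with
  | nil => simp [pvSplit, pv_ic_singleton]
  | cons c r ih =>
    by_cases hc : c = '\n'
    · cases hh : pvSplit r with
      | nil => exact absurd hh (pvSplit_ne_nil r)
      | cons a t =>
        rw [hh] at ih
        simp [pvSplit, hc, hh, pv_ic_cons, ih]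
    · cases hh : pvSplit r with
      | nil => exact absurd hh (pvSplit_ne_nil r)
      | cons a t =>
        rw [hh] at ih
        cases t with
        | nil =>
          simp [pvSplit, hc, hh, pv_ic_singleton] at ih ⊢
          simp [ih]
        | cons b t' =>
          simp [pvSplit, hc, hh, pv_ic_cons] at ih ⊢
          simp [ih]

-- find.go: shift of the starting counter
theorem pv_find_go_ge (sub : List Char) : ∀ (l : List Char) (k : Nat),
    PySem.Chars.find.go sub l k = -1 ∨ (k : Int) ≤ PySem.Chars.find.go sub l k := by
  intro l
  induction l with
  | nil =>
    intro k
    by_cases h : sub.isEmpty <;> simp [PySem.Chars.find.go, h]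
  | cons c t ih =>
    intro k
    by_cases h : sub.isPrefixOf (c :: t)
    · right; simp [PySem.Chars.find.go, h]
    · have := ih (k + 1)
      rcases this with h1 | h1
      · left; simpa [PySem.Chars.find.go, h] using h1
      · right
        have : PySem.Chars.find.go sub (c :: t) k = PySem.Chars.find.go sub t (k + 1) := by
          simp [PySem.Chars.find.go, h]
        rw [this]
        omega

theorem pv_find_go_shift (sub : List Char) : ∀ (l : List Char) (k : Nat),
    PySem.Chars.find.go sub l k
      = if PySem.Chars.find.go sub l 0 = -1 then -1 else (k : Int) + PySem.Chars.find.go sub l 0 := by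
  intro l
  induction l with
  | nil =>
    intro k
    by_cases h : sub.isEmpty <;> simp [PySem.Chars.find.go, h]
  | cons c t ih =>
    intro k
    by_cases h : sub.isPrefixOf (c :: t)
    · simp [PySem.Chars.find.go, h]
    · have e : ∀ m : Nat, PySem.Chars.find.go sub (c :: t) m = PySem.Chars.find.go sub t (m + 1) := by
        intro m; simp [PySem.Chars.find.go, h]
      rw [e k, e 0, ih (k + 1), ih 1]
      rcases pv_find_go_ge sub t 0 with h0 | h0
      · simp [h0]
      · have hne : PySem.Chars.find.go sub t 0 ≠ -1 := by omega
        simp only [if_neg hne]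
        split_ifs with h2 <;> push_cast at h2 ⊢ <;> omega

theorem pv_find_nonneg (l sub : List Char) :
    PySem.Chars.find l sub = -1 ∨ 0 ≤ PySem.Chars.find l sub := by
  simpa using pv_find_go_ge sub l 0

theorem pv_find_cons_pos (c : Char) (l sub : List Char) (h : sub.isPrefixOf (c :: l) = true) :
    PySem.Chars.find (c :: l) sub = 0 := by
  simp [PySem.Chars.find, PySem.Chars.find.go, h]

theorem pv_find_cons_neg (c : Char) (l sub : List Char) (h : sub.isPrefixOf (c :: l) = false) :
    PySem.Chars.find (c :: l) sub
      = if PySem.Chars.find l sub = -1 then -1 else 1 + PySem.Chars.find l sub := by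
  have e : PySem.Chars.find (c :: l) sub = PySem.Chars.find.go sub l 1 := by
    simp [PySem.Chars.find, PySem.Chars.find.go, h]
  rw [e, pv_find_go_shift sub l 1]
  rfl

-- a prefix that avoids c cannot reach past a c-separator
theorem pv_prefix_cut {p : List Char} {c : Char} (hp : c ∉ p) :
    ∀ (l r : List Char), c ∉ l → p <+: l ++ c :: r → p <+: l := by
  induction p with
  | nil => intro l r _ _; exact List.nil_prefix
  | cons a p' ih =>
    intro l r hl h
    cases l with
    | nil =>
      rw [List.nil_append] at h
      rcases List.cons_prefix_cons.mp h with ⟨h1, -⟩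
      exact absurd (show c ∈ a :: p' by simp [h1]) hp
    | cons b l' =>
      rcases List.cons_prefix_cons.mp h with ⟨h1, h2⟩
      have hp' : c ∉ p' := fun hm => hp (by simp [hm])
      have hl' : c ∉ l' := fun hm => hl (by simp [hm])
      exact List.cons_prefix_cons.mpr ⟨h1, ih hp' l' r hl' h2⟩

theorem pv_nl_not_marker : '\n' ∉ pvMarkerL := by decide

theorem pv_sw_append (l0 r : List Char) (h : '\n' ∉ l0) :
    pvMarkerL.isPrefixOf (l0 ++ '\n' :: r) = pvMarkerL.isPrefixOf l0 := by
  by_cases hl : pvMarkerL.isPrefixOf l0 = true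
  · rw [hl]
    exact List.isPrefixOf_iff_prefix.mpr
      ((List.isPrefixOf_iff_prefix.mp hl).trans (List.prefix_append _ _))
  · simp only [Bool.not_eq_true] at hl
    rw [hl]
    rw [Bool.eq_false_iff]
    intro hc
    have := pv_prefix_cut pv_nl_not_marker l0 r h (List.isPrefixOf_iff_prefix.mp hc)
    rw [List.isPrefixOf_iff_prefix.symm] at this
    simp [this] at hl

theorem pv_sw_ic (l0 : List Char) (ls' : List (List Char))
    (hfree : ∀ l ∈ l0 :: ls', '\n' ∉ l) :
    pvMarkerL.isPrefixOf (List.intercalate ['\n'] (l0 :: ls')) = pvMarkerL.isPrefixOf l0 := by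
  cases ls' with
  | nil => rw [pv_ic_singleton]
  | cons l1 t =>
    rw [pv_ic_cons]
    exact pv_sw_append l0 _ (hfree l0 (by simp))

theorem pv_find_pat_append (l0 r : List Char) (h : '\n' ∉ l0) :
    PySem.Chars.find (l0 ++ '\n' :: r) pvPat
      = if pvMarkerL.isPrefixOf r then (l0.length : Int)
        else if PySem.Chars.find r pvPat = -1 then -1
        else (l0.length : Int) + 1 + PySem.Chars.find r pvPat := by
  induction l0 with
  | nil =>
    by_cases hm : pvMarkerL.isPrefixOf r = true
    · have : pvPat.isPrefixOf ('\n' :: r) = true := by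
        simp [pvPat, hm]
      simp [pv_find_cons_pos _ _ _ this, hm]
    · simp only [Bool.not_eq_true] at hm
      have : pvPat.isPrefixOf ('\n' :: r) = false := by
        simp [pvPat, hm]
      rw [List.nil_append, pv_find_cons_neg _ _ _ this,
        if_neg (show ¬pvMarkerL.isPrefixOf r = true by simp [hm])]
      split_ifs with h1
      · rfl
      · simp
  | cons c l0' ih =>
    have hc : c ≠ '\n' := by intro hc; exact h (by simp [hc])
    have hr : '\n' ∉ l0' := fun hm => h (by simp [hm])
    have hpre : pvPat.isPrefixOf (c :: (l0' ++ '\n' :: r)) = false := by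
      simp [pvPat, List.isPrefixOf]
      exact fun he => absurd he.symm hc
    rw [List.cons_append, pv_find_cons_neg _ _ _ hpre, ih hr]
    by_cases hm : pvMarkerL.isPrefixOf r = true
    · have hne2 : ((l0'.length : Int)) ≠ -1 := by omega
      rw [if_pos hm, if_pos hm, if_neg hne2]
      simp only [List.length_cons]
      push_cast
      ring
    · simp only [Bool.not_eq_true] at hm
      by_cases hf : PySem.Chars.find r pvPat = -1
      · simp [hm, hf]
      · have h0 : 0 ≤ PySem.Chars.find r pvPat := by
          rcases pv_find_nonneg r pvPat with h1 | h1
          · exact absurd h1 hf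
          · exact h1
        have hne3 : (l0'.length : Int) + 1 + PySem.Chars.find r pvPat ≠ -1 := by omega
        rw [if_neg (show ¬pvMarkerL.isPrefixOf r = true by simp [hm]),
          if_neg (show ¬pvMarkerL.isPrefixOf r = true by simp [hm]),
          if_neg hf, if_neg hf, if_neg hne3]
        simp only [List.length_cons]
        push_cast
        ring

theorem pv_nl_mem_pat : '\n' ∈ pvPat := by simp [pvPat]

theorem pv_find_pat_none : ∀ (ls' : List (List Char)) (l0 : List Char),
    (∀ l ∈ l0 :: ls', '\n' ∉ l) →
    ((PySem.Chars.find (List.intercalate ['\n'] (l0 :: ls')) pvPat = -1)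
      ↔ ∀ l ∈ ls', pvMarkerL.isPrefixOf l = false) := by
  intro ls'
  induction ls' with
  | nil =>
    intro l0 hfree
    rw [pv_ic_singleton]
    have : PySem.Chars.find l0 pvPat = -1 := by
      rw [PySem.Chars.find_eq_neg_one_iff]
      intro hin
      exact hfree l0 (by simp) (hin.subset pv_nl_mem_pat)
    simp [this]
  | cons l1 t ih =>
    intro l0 hfree
    have hfree' : ∀ l ∈ l1 :: t, '\n' ∉ l := fun l hl => hfree l (by simp [hl])
    rw [pv_ic_cons, pv_find_pat_append l0 _ (hfree l0 (by simp)), pv_sw_ic l1 t hfree']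
    by_cases hm : pvMarkerL.isPrefixOf l1 = true
    · have : ((l0.length : Int)) ≠ -1 := by omega
      simp [hm, this]
    · simp only [Bool.not_eq_true] at hm
      by_cases hf : PySem.Chars.find (List.intercalate ['\n'] (l1 :: t)) pvPat = -1
      · rw [if_neg (show ¬pvMarkerL.isPrefixOf l1 = true by simp [hm]), if_pos hf]
        rw [ih l1 hfree'] at hf
        constructor
        · intro _ l hl
          rcases List.mem_cons.mp hl with h1 | h1
          · rw [h1]; exact hm
          · exact hf l h1
        · intro _; rfl
      · have h0 : 0 ≤ PySem.Chars.find (List.intercalate ['\n'] (l1 :: t)) pvPat := by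
          rcases pv_find_nonneg _ pvPat with h1 | h1
          · exact absurd h1 hf
          · exact h1
        have hne : (l0.length : Int) + 1 + PySem.Chars.find (List.intercalate ['\n'] (l1 :: t)) pvPat ≠ -1 := by omega
        rw [if_neg (show ¬pvMarkerL.isPrefixOf l1 = true by simp [hm]), if_neg hf]
        constructor
        · intro h; exact absurd h hne
        · intro hall
          exact absurd ((ih l1 hfree').mpr (fun l hl => hall l (by simp [hl]))) hf

def pvFirstIdx? : List (List Char) → Option Nat
  | [] => none
  | l :: t => if pvMarkerL.isPrefixOf l then some 0 else (pvFirstIdx? t).map (· + 1)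

theorem pvFirstIdx?_cons (l : List Char) (t : List (List Char)) :
    pvFirstIdx? (l :: t)
      = if pvMarkerL.isPrefixOf l then some 0 else (pvFirstIdx? t).map (· + 1) := rfl

theorem pvFirstIdx?_none_iff : ∀ (ls : List (List Char)),
    pvFirstIdx? ls = none ↔ ∀ l ∈ ls, pvMarkerL.isPrefixOf l = false := by
  intro ls
  induction ls with
  | nil => simp [pvFirstIdx?]
  | cons l t ih =>
    by_cases h : pvMarkerL.isPrefixOf l = true
    · simp [pvFirstIdx?, h]
    · simp only [Bool.not_eq_true] at h
      simp [pvFirstIdx?, h, Option.map_eq_none_iff, ih]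

theorem pv_loop_enum_none : ∀ (ls : List (List Char)), pvFirstIdx? ls = none →
    ∀ (k : Int), pvFirstIdxLoop (PySem.List.enumerate ls k) = 0 := by
  intro ls
  induction ls with
  | nil => intro _ k; simp [PySem.List.enumerate_nil, pvFirstIdxLoop]
  | cons l t ih =>
    intro hn k
    rw [pvFirstIdx?_cons] at hn
    by_cases h : pvMarkerL.isPrefixOf l = true
    · rw [if_pos h] at hn; exact absurd hn (by simp)
    · rw [if_neg (by simp [h] : ¬(pvMarkerL.isPrefixOf l = true))] at hn
      rw [PySem.List.enumerate_cons]
      rw [show pvFirstIdxLoop ((k, l) :: PySem.List.enumerate t (k + 1))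
            = pvFirstIdxLoop (PySem.List.enumerate t (k + 1)) from by
          simp [pvFirstIdxLoop, PySem.Chars.startswith, h]]
      exact ih (by simpa using hn) (k + 1)

theorem pv_loop_enum_some : ∀ (ls : List (List Char)) (i : Nat), pvFirstIdx? ls = some i →
    ∀ (k : Int), pvFirstIdxLoop (PySem.List.enumerate ls k) = k + i := by
  intro ls
  induction ls with
  | nil => intro i hi k; simp [pvFirstIdx?] at hi
  | cons l t ih =>
    intro i hi k
    rw [pvFirstIdx?_cons] at hi
    rw [PySem.List.enumerate_cons]
    by_cases h : pvMarkerL.isPrefixOf l = true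
    · rw [if_pos h] at hi
      have : i = 0 := by simpa using hi.symm
      subst this
      simp [pvFirstIdxLoop, PySem.Chars.startswith, h]
    · rw [if_neg (by simp [h] : ¬(pvMarkerL.isPrefixOf l = true))] at hi
      rcases Option.map_eq_some_iff.mp hi with ⟨i', hi', hii⟩
      rw [show pvFirstIdxLoop ((k, l) :: PySem.List.enumerate t (k + 1))
            = pvFirstIdxLoop (PySem.List.enumerate t (k + 1)) from by
          simp [pvFirstIdxLoop, PySem.Chars.startswith, h]]
      rw [ih i' hi' (k + 1), ← hii]
      push_cast
      ring

def pvFunB (cs : List Char) : List Char :=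
  if pvMarkerL.isPrefixOf cs then cs
  else if PySem.Chars.find cs pvPat = -1 then cs
  else cs.drop (PySem.Chars.find cs pvPat + 1).toNat

theorem pv_drop_sep (l0 r : List Char) : (l0 ++ '\n' :: r).drop (l0.length + 1) = r := by
  have : l0 ++ '\n' :: r = (l0 ++ ['\n']) ++ r := by simp
  rw [this]
  have := List.drop_left (l₁ := l0 ++ ['\n']) (l₂ := r)
  simpa using this

theorem pvCore : ∀ (ls : List (List Char)), ls ≠ [] → (∀ l ∈ ls, '\n' ∉ l) →
    pvFunB (List.intercalate ['\n'] ls)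
      = List.intercalate ['\n'] (ls.drop ((pvFirstIdx? ls).getD 0)) := by
  intro ls
  induction ls with
  | nil => intro h; exact absurd rfl h
  | cons l0 ls' ih =>
    intro _ hfree
    by_cases h0 : pvMarkerL.isPrefixOf l0 = true
    · have hsw : pvMarkerL.isPrefixOf (List.intercalate ['\n'] (l0 :: ls')) = true := by
        rw [pv_sw_ic l0 ls' hfree]; exact h0
      simp [pvFunB, hsw, pvFirstIdx?, h0]
    · simp only [Bool.not_eq_true] at h0
      have hsw : pvMarkerL.isPrefixOf (List.intercalate ['\n'] (l0 :: ls')) = false := by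
        rw [pv_sw_ic l0 ls' hfree]; exact h0
      cases ls' with
      | nil =>
        have hf : PySem.Chars.find (List.intercalate ['\n'] [l0]) pvPat = -1 := by
          rw [pv_find_pat_none [] l0 hfree]; intro l hl; simp at hl
        simp [pvFunB, hsw, hf, pvFirstIdx?, h0]
      | cons l1 t =>
        have hfree' : ∀ l ∈ l1 :: t, '\n' ∉ l := fun l hl => hfree l (by simp [hl])
        have h0nl : '\n' ∉ l0 := hfree l0 (by simp)
        have hic : List.intercalate ['\n'] (l0 :: l1 :: t)
            = l0 ++ '\n' :: List.intercalate ['\n'] (l1 :: t) := pv_ic_cons l0 l1 t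
        set r := List.intercalate ['\n'] (l1 :: t) with hr
        have hfind := pv_find_pat_append l0 r h0nl
        by_cases hm : pvMarkerL.isPrefixOf l1 = true
        · -- second line matches: drop everything through the first separator
          have hmr : pvMarkerL.isPrefixOf r = true := by
            rw [hr, pv_sw_ic l1 t hfree']; exact hm
          rw [hmr, if_pos rfl] at hfind
          have hne : ((l0.length : Int)) ≠ -1 := by omega
          have hdrop : (l0 ++ '\n' :: r).drop ((l0.length : Int) + 1).toNat = r := by
            have : ((l0.length : Int) + 1).toNat = l0.length + 1 := by omega
            rw [this, pv_drop_sep]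
          simp only [pvFunB, hic, hfind]
          rw [show pvMarkerL.isPrefixOf (l0 ++ '\n' :: r) = false from by
                rw [pv_sw_append l0 r h0nl]; exact h0]
          simp only [Bool.false_eq_true, if_false, if_neg hne, hdrop]
          simp [pvFirstIdx?, h0, hm, hr]
        · simp only [Bool.not_eq_true] at hm
          have hmr : pvMarkerL.isPrefixOf r = false := by
            rw [hr, pv_sw_ic l1 t hfree']; exact hm
          rw [hmr] at hfind
          simp only [Bool.false_eq_true, if_false] at hfind
          have hswa : pvMarkerL.isPrefixOf (l0 ++ '\n' :: r) = false := by
            rw [pv_sw_append l0 r h0nl]; exact h0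
          by_cases hf : PySem.Chars.find r pvPat = -1
          · -- no match anywhere
            have hnone : pvFirstIdx? (l1 :: t) = none := by
              rw [pvFirstIdx?_none_iff]
              intro l hl
              rcases List.mem_cons.mp hl with h1 | h1
              · rw [h1]; exact hm
              · exact (pv_find_pat_none t l1 hfree').mp (hr ▸ hf) l h1
            have hidx : pvFirstIdx? (l0 :: l1 :: t) = none := by
              rw [pvFirstIdx?_cons, if_neg (by simp [h0]), hnone]; rfl
            rw [if_pos hf] at hfind
            rw [hidx]
            simp only [Option.getD_none, List.drop_zero]
            rw [hic]
            simp [pvFunB, hswa, hfind]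
          · -- match strictly below: recurse
            have h0f : 0 ≤ PySem.Chars.find r pvPat := by
              rcases pv_find_nonneg r pvPat with h1 | h1
              · exact absurd h1 hf
              · exact h1
            rw [if_neg hf] at hfind
            have hneI : (l0.length : Int) + 1 + PySem.Chars.find r pvPat ≠ -1 := by omega
            have hsome : ∃ j, pvFirstIdx? (l1 :: t) = some j := by
              cases hh : pvFirstIdx? (l1 :: t) with
              | none =>
                exact absurd ((pv_find_pat_none t l1 hfree').mpr
                  (fun l hl => (pvFirstIdx?_none_iff (l1 :: t)).mp hh l (by simp [hl]))) (hr ▸ hf)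
              | some j => exact ⟨j, rfl⟩
            rcases hsome with ⟨j, hj⟩
            have hdrop : (l0 ++ '\n' :: r).drop ((l0.length : Int) + 1 + PySem.Chars.find r pvPat + 1).toNat
                = r.drop (PySem.Chars.find r pvPat + 1).toNat := by
              have e1 : ((l0.length : Int) + 1 + PySem.Chars.find r pvPat + 1).toNat
                  = (l0.length + 1) + (PySem.Chars.find r pvPat + 1).toNat := by omega
              rw [e1, ← List.drop_drop, pv_drop_sep]
            have hBr : pvFunB r = r.drop (PySem.Chars.find r pvPat + 1).toNat := by
              simp [pvFunB, hmr, hf]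
            have hIH := ih (by simp) hfree'
            have hidx : pvFirstIdx? (l0 :: l1 :: t) = some (j + 1) := by
              rw [pvFirstIdx?_cons, if_neg (by simp [h0]), hj]; rfl
            have hval : pvFunB (List.intercalate ['\n'] (l0 :: l1 :: t))
                = r.drop (PySem.Chars.find r pvPat + 1).toNat := by
              rw [hic]
              simp only [pvFunB, hswa, Bool.false_eq_true, if_false, hfind, if_neg hneI, hdrop]
            rw [hval, ← hBr, hIH, hidx]
            simp [hj]

theorem pv_portA_toList (s : String) :
    (extract_prompt_content_py s).toList
      = List.intercalate ['\n']
          ((pvSplit s.toList).drop ((pvFirstIdx? (pvSplit s.toList)).getD 0)) := by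
  show (String.ofList (PySem.Chars.join ['\n'] (PySem.List.slice
      (PySem.Chars.splitOn s.toList ['\n'])
      (some (pvFirstIdxLoop (PySem.List.enumerate (PySem.Chars.splitOn s.toList ['\n'])))) none))).toList
    = _
  rw [pv_splitOn_eq]
  cases h : pvFirstIdx? (pvSplit s.toList) with
  | none =>
    rw [pv_loop_enum_none (pvSplit s.toList) h 0]
    rw [PySem.List.slice_from _ (by omega : (0:Int) ≤ 0)]
    simp [PySem.Chars.join]
  | some i =>
    rw [pv_loop_enum_some (pvSplit s.toList) i h 0]
    have e : ((0 : Int) + i) = (i : Int) := by omega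
    rw [e, PySem.List.slice_from _ (by omega : (0:Int) ≤ i)]
    simp [PySem.Chars.join]

theorem pv_portB_toList (s : String) :
    (extract_prompt_content_py_alt s).toList = pvFunB s.toList := by
  have hm : ("You are an IFRS expert").toList = pvMarkerL := rfl
  have hp : ("\nYou are an IFRS expert").toList = pvPat := by decide
  unfold extract_prompt_content_py_alt pvFunB
  simp only [PySem.Str.startswith, PySem.Chars.startswith, PySem.Str.find, PySem.Str.slice,
    PySem.Chars.slice, hm, hp]
  by_cases h0 : pvMarkerL.isPrefixOf s.toList = true
  · simp [h0]
  · simp only [Bool.not_eq_true] at h0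
    by_cases hf : PySem.Chars.find s.toList pvPat = -1
    · simp [h0, hf]
    · have hge : 0 ≤ PySem.Chars.find s.toList pvPat := by
        rcases pv_find_nonneg s.toList pvPat with h1 | h1
        · exact absurd h1 hf
        · exact h1
      simp only [h0, Bool.false_eq_true, if_false, hf]
      rw [PySem.List.slice_from _ (by omega)]
      simp

-- ===== VERDICT (by name: the statement is the Claim_ definition above) =====
theorem extract_prompt_content_py_spec : Claim_equal_extract_prompt_content_py := by
  intro s _
  unfold Spec_extract_prompt_content_py
  apply String.toList_inj.mp
  rw [pv_portA_toList, pv_portB_toList]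
  have h := pvCore (pvSplit s.toList) (pvSplit_ne_nil s.toList) (pvSplit_free s.toList)
  rw [pv_ic_pvSplit] at h
  exact h.symm
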